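-- pv_equiv track=rewrite | github.com/kian-nick/fish-tank | 水槽112/bfsAlgo.py | nodeCleaner
-- ===== SOURCE A (Python) =====
-- def nodeCleaner(adjList):
--     startingRows = [None, 22, 24, 28, 19, 19, 19, 14, 13, 19, 15, 15, 17, 18,
--     18, 18, 18, 18, 30, 35, 35, 35, 35, 35, 35, 35, 35, 35, 35, 11, 8, 9, 10,
--     16, 35, 35, 35, 33, 33, 32, 17, 17, 16, 14, 14, 12, 12, 13, 12, 12, 19, 19,
--     21, 21, 22, 22, 24, 28, 19, 19, 19]
--     toRemove = set()
--     removedEdges = 0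
--     for col in range(1, 61):
--         startingRow = startingRows[col]
--         for row in range(startingRow, 41):
--             futile = ((row - 1) * 60) + col
--             toRemove.add(futile)
--             adjList[futile] = set()
--             for key in adjList:
--                 if futile in adjList[key]:
--                     adjList[key].remove(futile)
--                     removedEdges += 1
--     return adjList
-- ===== SOURCE B (Python) =====
-- def nodeCleaner(adjList):
--     startingRows = [None, 22, 24, 28, 19, 19, 19, 14, 13, 19, 15, 15, 17, 18,
--     18, 18, 18, 18, 30, 35, 35, 35, 35, 35, 35, 35, 35, 35, 35, 11, 8, 9, 10,
--     16, 35, 35, 35, 33, 33, 32, 17, 17, 16, 14, 14, 12, 12, 13, 12, 12, 19, 19,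
--     21, 21, 22, 22, 24, 28, 19, 19, 19]
--
--     def is_futile(n):
--         col = ((n - 1) % 60) + 1
--         row = ((n - 1) // 60) + 1
--         return startingRows[col] <= row <= 40
--
--     # one grid pass only to ensure every futile node is present as a key
--     for col in range(1, 61):
--         for row in range(startingRows[col], 41):
--             adjList.setdefault((row - 1) * 60 + col, set())
--     # one pass over a snapshot of the keys
--     for key in list(adjList):
--         if is_futile(key):
--             adjList[key] = set()
--         else:
--             adjList[key] = {n for n in adjList[key] if not is_futile(n)}
--     return adjList
-- ===== Notes on version B (the rewrite author's own statement) =====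
-- stated objective: faster
-- what changed: A loops over ~1100 futile grid nodes and for each one rescans every key of the dict to delete that node from the neighbour sets; B derives a closed-form is_futile(n) predicate from the grid arithmetic ((n-1)%60, (n-1)//60), adds the futile keys in one grid pass of setdefault, and then cleans every neighbour set in a single pass over the keys, so the per-futile-node rescan of the whole dict disappears.
import Mathlib
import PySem

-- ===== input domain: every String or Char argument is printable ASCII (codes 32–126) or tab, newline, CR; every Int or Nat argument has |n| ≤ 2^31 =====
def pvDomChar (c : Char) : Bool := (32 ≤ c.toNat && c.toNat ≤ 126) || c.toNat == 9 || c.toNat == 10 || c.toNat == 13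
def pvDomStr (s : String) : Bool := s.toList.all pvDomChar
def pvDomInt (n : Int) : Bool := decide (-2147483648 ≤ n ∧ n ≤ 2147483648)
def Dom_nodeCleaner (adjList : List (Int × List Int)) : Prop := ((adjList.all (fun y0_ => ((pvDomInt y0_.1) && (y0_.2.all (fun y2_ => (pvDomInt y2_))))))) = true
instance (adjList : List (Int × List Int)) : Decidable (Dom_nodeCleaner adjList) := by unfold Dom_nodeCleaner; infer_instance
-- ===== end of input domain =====

-- B replaces A's per-futile-node rescan of the whole dict by a closed-form futility
-- predicate and a single pass over the keys (objective: faster).  Both Pythons mutate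
-- the argument dict in place; the equivalence proved here is about the RETURN value
-- (which is that same dict object in both Pythons).

-- The Python dict is carried as its association list (insertion order); each dict
-- operation is the corresponding PySem.Dict operation through mk/items:
def pvDGetD (l : List (Int × List Int)) (k : Int) (d0 : List Int) : List Int :=
  (PySem.Dict.mk l).getD k d0
def pvDInsert (l : List (Int × List Int)) (k : Int) (v : List Int) : List (Int × List Int) :=
  ((PySem.Dict.mk l).insert k v).items
def pvDKeys (l : List (Int × List Int)) : List Int :=
  (PySem.Dict.mk l).keys
def pvDSetdefault (l : List (Int × List Int)) (k : Int) (v : List Int) : List (Int × List Int) :=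
  ((PySem.Dict.mk l).setdefault k v).items

-- ===== PORT A =====
-- Python's startingRows list (hoisted to a named constant; its index-0 entry is None
-- in Python but is only ever read at indices 1..60, so it is ported as 0).
def pvStartingRows : List Int :=
  [0, 22, 24, 28, 19, 19, 19, 14, 13, 19, 15, 15, 17, 18,
   18, 18, 18, 18, 30, 35, 35, 35, 35, 35, 35, 35, 35, 35, 35, 11, 8, 9, 10,
   16, 35, 35, 35, 33, 33, 32, 17, 17, 16, 14, 14, 12, 12, 13, 12, 12, 19, 19,
   21, 21, 22, 22, 24, 28, 19, 19, 19]

-- A's three nested loops over the mutated dict.  A's accumulators `toRemove` and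
-- `removedEdges` are dead code (written, never read afterwards; they do not touch
-- the returned dict) and are not carried by the port.
def nodeCleaner (adjList : List (Int × List Int)) : List (Int × List Int) :=
  (PySem.List.pyRange 1 61).foldl
    (fun adj col =>
      let startingRow := PySem.List.pyGetD pvStartingRows col 0
      (PySem.List.pyRange startingRow 41).foldl
        (fun adj row =>
          let futile := (row - 1) * 60 + col
          let adj := pvDInsert adj futile []              -- adjList[futile] = set()
          adj.foldl                                       -- for key in adjList (key, adjList[key])
            (fun adj kv =>
              if futile ∈ kv.2 then                      -- if futile in adjList[key]
                pvDInsert adj kv.1 (PySem.Set.discard kv.2 futile)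
              else adj)                                   -- adjList[key].remove(futile)
            adj)
        adj)
    adjList

-- ===== PORT B =====
def pvIsFutile (n : Int) : Bool :=
  let col := PySem.Int.mod (n - 1) 60 + 1
  let row := PySem.Int.floordiv (n - 1) 60 + 1
  decide (PySem.List.pyGetD pvStartingRows col 0 ≤ row ∧ row ≤ 40)

def nodeCleaner_alt (adjList : List (Int × List Int)) : List (Int × List Int) :=
  -- one grid pass only to ensure every futile node is present as a key
  let d1 :=
    (PySem.List.pyRange 1 61).foldl
      (fun adj col =>
        (PySem.List.pyRange (PySem.List.pyGetD pvStartingRows col 0) 41).foldl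
          (fun adj row => pvDSetdefault adj ((row - 1) * 60 + col) []) adj)
      adjList
  -- one pass over a snapshot of the keys
  (pvDKeys d1).foldl
    (fun adj key =>
      if pvIsFutile key then pvDInsert adj key []
      else pvDInsert adj key ((pvDGetD adj key []).filter (fun n => !pvIsFutile n)))
    d1

-- ===== PRECONDITION & SPEC =====
-- Pre_ is the dict representation invariant: the association list has pairwise
-- distinct keys, as the association list of every actual Python dict argument does
-- (an assoc list with a duplicated key denotes no Python dict at all).
def Pre_nodeCleaner (adjList : List (Int × List Int)) : Prop :=
  (adjList.map Prod.fst).Nodup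

instance (adjList : List (Int × List Int)) : Decidable (Pre_nodeCleaner adjList) := by
  unfold Pre_nodeCleaner; infer_instance

def pvWitness_nodeCleaner : (List (Int × List Int)) := [(1, [2, 1261]), (1261, [1]), (-5, [])]

def Spec_nodeCleaner (adjList : List (Int × List Int)) (out : List (Int × List Int)) : Prop := out = nodeCleaner_alt adjList
instance (adjList : List (Int × List Int)) (out : List (Int × List Int)) : Decidable (Spec_nodeCleaner adjList out) := by unfold Spec_nodeCleaner; infer_instance

-- ===== CLAIM (what is proved, stated in full; the proofs are below) =====
def Claim_equal_nodeCleaner : Prop := ∀ (adjList : List (Int × List Int)), Dom_nodeCleaner adjList → Pre_nodeCleaner adjList → Spec_nodeCleaner adjList (nodeCleaner adjList)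

-- ===== LEMMAS AND PROOFS =====

-- the futile nodes in A's generation order
def pvF : List Int :=
  (PySem.List.pyRange 1 61).flatMap
    (fun col =>
      (PySem.List.pyRange (PySem.List.pyGetD pvStartingRows col 0) 41).map
        (fun row => (row - 1) * 60 + col))

-- the elements of L not among ks, first occurrences, in order
def pvNewKeys : List Int → List Int → List Int
  | [], _ => []
  | f :: L, ks => if f ∈ ks then pvNewKeys L ks else f :: pvNewKeys L (ks ++ [f])

-- A's per-futile-node phase, on the dict
def pvPhaseA (d : PySem.Dict Int (List Int)) (f : Int) : PySem.Dict Int (List Int) :=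
  let d1 := d.insert f ([] : List Int)
  d1.items.foldl
    (fun d kv =>
      if f ∈ kv.2 then d.insert kv.1 (PySem.Set.discard kv.2 f)
      else d)
    d1

-- A's per-futile-node phase, on the association list (as the port computes it)
def pvListPhase (l : List (Int × List Int)) (f : Int) : List (Int × List Int) :=
  let l1 := pvDInsert l f []
  l1.foldl
    (fun l kv =>
      if f ∈ kv.2 then pvDInsert l kv.1 (PySem.Set.discard kv.2 f)
      else l)
    l1

theorem pvMkItems (d : PySem.Dict Int (List Int)) : PySem.Dict.mk (PySem.Dict.items d) = d := rfl

-- generic characterisation of a fold over (a subset of) the keys updating values in place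
theorem pvKeyfold (u : Int → List Int → List Int)
    (st : PySem.Dict Int (List Int) → Int → PySem.Dict Int (List Int))
    (hst : ∀ (s : PySem.Dict Int (List Int)) (k : Int), s.keys.Nodup → k ∈ s.keys →
      (st s k).items = s.items.map (fun kv => if kv.1 = k then (k, u k kv.2) else kv)) :
    ∀ (ks : List Int) (d : PySem.Dict Int (List Int)), ks.Nodup → d.keys.Nodup →
      (∀ k ∈ ks, k ∈ d.keys) →
      (ks.foldl st d).items
        = d.items.map (fun kv => if kv.1 ∈ ks then (kv.1, u kv.1 kv.2) else kv) := by
  intro ks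
  induction ks with
  | nil => intro d _ _ _; simp
  | cons k t ih =>
    intro d hks hnd hsub
    have hk : k ∈ d.keys := hsub k (by simp)
    have hitems := hst d k hnd hk
    have hkeys : (st d k).keys = d.keys := by
      simp only [PySem.Dict.keys, hitems, List.map_map]
      apply List.map_congr_left
      intro p _
      by_cases h : p.1 = k <;> simp [h]
    have hsub' : ∀ x ∈ t, x ∈ (st d k).keys := by
      intro x hx; rw [hkeys]; exact hsub x (by simp [hx])
    rw [List.foldl_cons, ih (st d k) hks.of_cons (hkeys ▸ hnd) hsub', hitems, List.map_map]
    apply List.map_congr_left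
    intro p _
    by_cases h1 : p.1 = k
    · have hkt : k ∉ t := (List.nodup_cons.mp hks).1
      simp [h1, hkt]
    · by_cases h2 : p.1 ∈ t <;> simp [h1, h2]

-- pairs variant of pvKeyfold: a fold over the item pairs updating values in place
theorem pvPairsfold (u : Int → List Int → List Int)
    (st : PySem.Dict Int (List Int) → Int × List Int → PySem.Dict Int (List Int))
    (hst : ∀ (s : PySem.Dict Int (List Int)) (k : Int) (v : List Int), s.keys.Nodup →
      s.get? k = some v →
      (st s (k, v)).items = s.items.map (fun kv => if kv.1 = k then (k, u k v) else kv)) :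
    ∀ (ps : List (Int × List Int)) (d : PySem.Dict Int (List Int)),
      (ps.map Prod.fst).Nodup → d.keys.Nodup → (∀ p ∈ ps, d.get? p.1 = some p.2) →
      (ps.foldl st d).items
        = d.items.map
            (fun kv => if kv.1 ∈ ps.map Prod.fst then (kv.1, u kv.1 kv.2) else kv) := by
  intro ps
  induction ps with
  | nil => intro d _ _ _; simp
  | cons p t ih =>
    intro d hps hnd hget
    have hd : d.get? p.1 = some p.2 := hget p (by simp)
    have hitems := hst d p.1 p.2 hnd hd
    have hitems' : (st d p).items
        = d.items.map (fun kv => if kv.1 = p.1 then (p.1, u p.1 p.2) else kv) := by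
      rw [← hitems]
    have hkeys : (st d p).keys = d.keys := by
      simp only [PySem.Dict.keys, hitems', List.map_map]
      apply List.map_congr_left
      intro q _
      by_cases h : q.1 = p.1 <;> simp [h]
    have hnd' : (st d p).keys.Nodup := hkeys ▸ hnd
    have hget' : ∀ q ∈ t, (st d p).get? q.1 = some q.2 := by
      intro q hq
      have hq1 : q.1 ≠ p.1 := by
        intro h
        have : q.1 ∈ t.map Prod.fst := List.mem_map.mpr ⟨q, hq, rfl⟩
        exact (List.nodup_cons.mp (by simpa using hps)).1 (h ▸ this)
      have hmem : (q.1, q.2) ∈ d.items :=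
        PySem.Dict.mem_items_of_get?_eq_some d (hget q (by simp [hq]))
      have hmem' : (q.1, q.2) ∈ (st d p).items := by
        rw [hitems']
        exact List.mem_map.mpr ⟨(q.1, q.2), hmem, by simp [hq1]⟩
      exact PySem.Dict.get?_of_mem_items _ hmem' hnd'
    rw [List.foldl_cons, ih (st d p) (by simpa using hps.of_cons) hnd' hget', hitems',
      List.map_map]
    apply List.map_congr_left
    intro q hq
    have hpt : p.1 ∉ t.map Prod.fst := (List.nodup_cons.mp (by simpa using hps)).1
    by_cases h1 : q.1 = p.1
    · have hq2 : q.2 = p.2 := by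
        have h1' := PySem.Dict.get?_of_mem_items d (h1 ▸ (by exact hq) : (p.1, q.2) ∈ d.items) hnd
        rw [hd] at h1'
        exact (Option.some.injEq _ _).mp h1'.symm
      simp [h1, hq2, hpt]
    · by_cases h2 : q.1 ∈ t.map Prod.fst <;> simp [h1, h2]

theorem pvPhaseA_items (d : PySem.Dict Int (List Int)) (f : Int) (hnd : d.keys.Nodup) :
    (pvPhaseA d f).items
      = (d.insert f ([] : List Int)).items.map
          (fun kv => (kv.1, kv.2.filter (fun x => !(x == f)))) := by
  have hnd1 : (d.insert f ([] : List Int)).keys.Nodup := PySem.Dict.nodup_keys_insert d f [] hnd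
  have hpsnd : ((d.insert f ([] : List Int)).items.map Prod.fst).Nodup := hnd1
  have h := pvPairsfold (fun _ v => v.filter (fun x => !(x == f)))
      (fun d kv => if f ∈ kv.2 then d.insert kv.1 (PySem.Set.discard kv.2 f) else d)
      ?hst (d.insert f ([] : List Int)).items (d.insert f ([] : List Int)) hpsnd hnd1
      (fun p hp => PySem.Dict.get?_of_mem_items _ (by exact hp) hnd1)
  · rw [pvPhaseA, h]
    apply List.map_congr_left
    intro p hp
    have : p.1 ∈ (d.insert f ([] : List Int)).items.map Prod.fst :=
      List.mem_map.mpr ⟨p, hp, rfl⟩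
    simp [this]
  case hst =>
    intro s k v hs hv
    beta_reduce
    have hc : s.contains k = true := by
      rw [PySem.Dict.contains_eq_isSome_get?, hv]; rfl
    by_cases hf : f ∈ v
    · rw [if_pos hf, PySem.Dict.items_insert_of_contains s _ hc]
      apply List.map_congr_left
      intro p hp
      by_cases hpk : p.1 = k
      · have hpv : p.2 = v := by
          have h1 := PySem.Dict.get?_of_mem_items s (hpk ▸ (by exact hp) : (k, p.2) ∈ s.items) hs
          rw [hv] at h1; exact (Option.some.injEq _ _).mp h1.symm
        simp [hpk, hpv, PySem.Set.discard]
      · simp [hpk]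
    · rw [if_neg hf]
      conv_lhs => rw [← List.map_id s.items]
      symm
      apply List.map_congr_left
      intro p hp
      simp only [id]
      by_cases hpk : p.1 = k
      · have hpv : p.2 = v := by
          have h1 := PySem.Dict.get?_of_mem_items s (hpk ▸ (by exact hp) : (k, p.2) ∈ s.items) hs
          rw [hv] at h1; exact (Option.some.injEq _ _).mp h1.symm
        have : v.filter (fun x => !(x == f)) = v :=
          List.filter_eq_self.mpr (fun a ha => by simp; rintro rfl; exact hf ha)
        simp [hpk, hpv, this]
        exact Prod.ext hpk.symm hpv.symm
      · simp [hpk]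

theorem pvPhaseA_keys (d : PySem.Dict Int (List Int)) (f : Int) (hnd : d.keys.Nodup) :
    (pvPhaseA d f).keys = (d.insert f ([] : List Int)).keys := by
  simp only [PySem.Dict.keys, pvPhaseA_items d f hnd, List.map_map]
  apply List.map_congr_left; intro p _; rfl

theorem pvNewKeys_spec (L : List Int) :
    ∀ ks : List Int, (∀ x ∈ pvNewKeys L ks, x ∉ ks) ∧ (pvNewKeys L ks).Nodup := by
  induction L with
  | nil => intro ks; simp [pvNewKeys]
  | cons f L ih =>
    intro ks
    by_cases h : f ∈ ks
    · simpa [pvNewKeys, h] using ih ks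
    · have h2 := ih (ks ++ [f])
      refine ⟨?_, ?_⟩
      · intro x hx
        rw [pvNewKeys, if_neg h] at hx
        rcases List.mem_cons.mp hx with rfl | hx
        · exact h
        · intro hxk; exact h2.1 x hx (List.mem_append_left _ hxk)
      · rw [pvNewKeys, if_neg h]
        refine List.nodup_cons.mpr ⟨?_, h2.2⟩
        intro hf
        exact h2.1 f hf (List.mem_append_right _ (by simp))

theorem pvAfold (L : List Int) :
    ∀ d : PySem.Dict Int (List Int), d.keys.Nodup →
      (L.foldl pvPhaseA d).items
        = d.items.map (fun kv =>
            (kv.1, if kv.1 ∈ L then ([] : List Int)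
                   else kv.2.filter (fun x => decide (x ∉ L))))
          ++ (pvNewKeys L d.keys).map (fun k => (k, ([] : List Int))) := by
  induction L with
  | nil =>
    intro d _
    simp [pvNewKeys]
  | cons f L ih =>
    intro d hnd
    have hnd1 : (pvPhaseA d f).keys.Nodup := by
      rw [pvPhaseA_keys d f hnd]; exact PySem.Dict.nodup_keys_insert d f [] hnd
    rw [List.foldl_cons, ih (pvPhaseA d f) hnd1, pvPhaseA_items d f hnd,
      pvPhaseA_keys d f hnd]
    by_cases hc : d.contains f = true
    · have hfk : f ∈ d.keys := (PySem.Dict.contains_iff_mem_keys d f).mp hc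
      rw [PySem.Dict.items_insert_of_contains d _ hc,
        PySem.Dict.keys_insert_of_contains d _ hc, List.map_map, List.map_map]
      have hnew : pvNewKeys (f :: L) d.keys = pvNewKeys L d.keys := by
        rw [pvNewKeys, if_pos hfk]
      rw [hnew]
      congr 1
      apply List.map_congr_left
      intro p _
      by_cases hpf : p.1 = f
      · simp [hpf]
      · have hmc : (p.1 ∈ f :: L) = (p.1 ∈ L) := by simp [List.mem_cons, hpf]
        by_cases hpl : p.1 ∈ L
        · simp [hpf, hpl]
        · simp only [Function.comp_apply, beq_iff_eq, hpf, if_false, if_neg hpl,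
            hmc, List.filter_filter]
          simp only [List.mem_cons]
          refine congrArg _ ?_
          apply List.filter_congr
          intro x _
          by_cases hxf : x = f <;> by_cases hxl : x ∈ L <;> simp [hxf, hxl]
    · have hfk : f ∉ d.keys := fun h => by
        rw [(PySem.Dict.contains_iff_mem_keys d f).mpr h] at hc; exact hc rfl
      have hc' : d.contains f = false := by simpa using hc
      rw [PySem.Dict.items_insert_of_not_contains d _ hc',
        PySem.Dict.keys_insert_of_not_contains d _ hc']
      have hnew : pvNewKeys (f :: L) d.keys = f :: pvNewKeys L (d.keys ++ [f]) := by
        rw [pvNewKeys, if_neg hfk]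
      rw [hnew, List.map_append, List.map_append, List.map_map, List.map_cons]
      simp only [List.map_cons, List.map_nil, List.filter_nil, ite_self]
      rw [List.append_assoc, List.singleton_append]
      congr 1
      apply List.map_congr_left
      intro p hp
      have hpf : p.1 ≠ f := by
        intro h; exact hfk (h ▸ PySem.Dict.mem_keys_of_mem_items d hp)
      have hmc : (p.1 ∈ f :: L) = (p.1 ∈ L) := by simp [List.mem_cons, hpf]
      by_cases hpl : p.1 ∈ L
      · simp [hpf, hpl]
      · simp only [Function.comp_apply, hmc, if_neg hpl, List.filter_filter]
        refine congrArg (fun z => (p.1, z)) ?_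
        apply List.filter_congr
        intro x _
        by_cases hxf : x = f <;> by_cases hxl : x ∈ L <;> simp [hxf, hxl]

theorem pvSDfold (L : List Int) :
    ∀ d : PySem.Dict Int (List Int),
      (L.foldl (fun d f => d.setdefault f ([] : List Int)) d).items
        = d.items ++ (pvNewKeys L d.keys).map (fun k => (k, ([] : List Int))) := by
  induction L with
  | nil => intro d; simp [pvNewKeys]
  | cons f L ih =>
    intro d
    rw [List.foldl_cons]
    by_cases hc : d.contains f = true
    · have hfk : f ∈ d.keys := (PySem.Dict.contains_iff_mem_keys d f).mp hc
      rw [PySem.Dict.setdefault_of_contains d _ hc, ih d, pvNewKeys, if_pos hfk]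
    · have hfk : f ∉ d.keys := fun h => hc ((PySem.Dict.contains_iff_mem_keys d f).mpr h)
      have hc' : d.contains f = false := by simpa using hc
      rw [PySem.Dict.setdefault_of_not_contains d _ hc',
        ih (d.insert f []), PySem.Dict.items_insert_of_not_contains d _ hc',
        PySem.Dict.keys_insert_of_not_contains d _ hc', pvNewKeys, if_neg hfk,
        List.map_cons, List.append_assoc, List.singleton_append]

theorem pvBpass2 (d : PySem.Dict Int (List Int)) (hnd : d.keys.Nodup) :
    (d.keys.foldl
        (fun d key =>
          if pvIsFutile key then d.insert key ([] : List Int)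
          else d.insert key ((d.getD key []).filter (fun n => !pvIsFutile n)))
        d).items
      = d.items.map (fun kv =>
          (kv.1, if pvIsFutile kv.1 then ([] : List Int)
                 else kv.2.filter (fun n => !pvIsFutile n))) := by
  have h := pvKeyfold
      (fun k v => if pvIsFutile k then ([] : List Int) else v.filter (fun n => !pvIsFutile n))
      (fun d key =>
        if pvIsFutile key then d.insert key ([] : List Int)
        else d.insert key ((d.getD key []).filter (fun n => !pvIsFutile n)))
      ?hst d.keys d hnd hnd (fun k hk => hk)
  · rw [h]
    apply List.map_congr_left
    intro p hp
    simp [PySem.Dict.mem_keys_of_mem_items _ hp]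
  case hst =>
    intro s k hs hk
    beta_reduce
    have hc : s.contains k = true := (PySem.Dict.contains_iff_mem_keys s k).mpr hk
    obtain ⟨v, hv⟩ : ∃ v, s.get? k = some v := by
      have := PySem.Dict.contains_eq_isSome_get? s k
      rw [hc] at this
      exact Option.isSome_iff_exists.mp this.symm
    have hgetD : s.getD k [] = v := PySem.Dict.getD_of_get?_eq_some s [] hv
    have hrepl : ∀ w : List Int,
        (s.insert k w).items = s.items.map (fun kv => if kv.1 = k then (k, w) else kv) := by
      intro w
      rw [PySem.Dict.items_insert_of_contains s _ hc]
      apply List.map_congr_left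
      intro p _
      by_cases hpk : p.1 = k <;> simp [hpk]
    by_cases hfut : pvIsFutile k
    · rw [if_pos hfut, hrepl []]
      apply List.map_congr_left
      intro p _
      by_cases hpk : p.1 = k <;> simp [hpk, hfut]
    · rw [if_neg hfut, hrepl _, hgetD]
      apply List.map_congr_left
      intro p hp
      by_cases hpk : p.1 = k
      · have hpv : p.2 = v := by
          have h1 := PySem.Dict.get?_of_mem_items s (hpk ▸ (by exact hp) : (k, p.2) ∈ s.items) hs
          rw [hv] at h1; exact (Option.some.injEq _ _).mp h1.symm
        simp [hpk, hpv, hfut]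
      · simp [hpk]

set_option maxRecDepth 100000 in
set_option maxHeartbeats 1000000 in
theorem pvF_all : pvF.all pvIsFutile = true := by decide

theorem pvMemF (x : Int) : x ∈ pvF ↔ pvIsFutile x = true := by
  constructor
  · intro hx
    exact List.all_eq_true.mp pvF_all x hx
  · intro hx
    rw [pvIsFutile] at hx
    simp only [decide_eq_true_eq] at hx
    set c := PySem.Int.mod (x - 1) 60 + 1 with hc
    set r := PySem.Int.floordiv (x - 1) 60 + 1 with hr
    have hmod := PySem.Int.floordiv_mul_add_mod (x - 1) 60
    have h1 : (1 : Int) ≤ c := by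
      have := PySem.Int.mod_nonneg (x - 1) (b := 60) (by norm_num); omega
    have h2 : c < 61 := by
      have := PySem.Int.mod_lt (x - 1) (b := 60) (by norm_num); omega
    rw [pvF]
    apply List.mem_flatMap.mpr
    refine ⟨c, PySem.List.mem_pyRange_one.mpr ⟨h1, h2⟩, ?_⟩
    apply List.mem_map.mpr
    refine ⟨r, PySem.List.mem_pyRange_one.mpr ⟨hx.1, by omega⟩, ?_⟩
    omega


-- bridge: the inner item loop on the list side is the inner item loop on the dict side
theorem pvBridgeInner (f : Int) (ps : List (Int × List Int)) :
    ∀ l : List (Int × List Int),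
      ps.foldl
        (fun l kv =>
          if f ∈ kv.2 then pvDInsert l kv.1 (PySem.Set.discard kv.2 f) else l)
        l
      = (ps.foldl
          (fun d kv =>
            if f ∈ kv.2 then d.insert kv.1 (PySem.Set.discard kv.2 f) else d)
          (PySem.Dict.mk l)).items := by
  induction ps with
  | nil => intro l; rfl
  | cons p t ih =>
    intro l
    simp only [List.foldl_cons]
    by_cases h : f ∈ p.2
    · rw [if_pos h, if_pos h, ih]
      congr 1
    · rw [if_neg h, if_neg h, ih]

theorem pvBridgePhase (l : List (Int × List Int)) (f : Int) :
    pvListPhase l f = (pvPhaseA (PySem.Dict.mk l) f).items := by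
  rw [pvListPhase, pvPhaseA, pvBridgeInner]
  congr 1

theorem pvBridgeA (L : List Int) :
    ∀ l : List (Int × List Int),
      L.foldl pvListPhase l = (L.foldl pvPhaseA (PySem.Dict.mk l)).items := by
  induction L with
  | nil => intro l; rfl
  | cons f t ih =>
    intro l
    simp only [List.foldl_cons]
    rw [pvBridgePhase, ih, pvMkItems]

theorem pvBridgeSD (L : List Int) :
    ∀ l : List (Int × List Int),
      L.foldl (fun l f => pvDSetdefault l f []) l
        = (L.foldl (fun d f => d.setdefault f ([] : List Int)) (PySem.Dict.mk l)).items := by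
  induction L with
  | nil => intro l; rfl
  | cons f t ih =>
    intro l
    simp only [List.foldl_cons]
    rw [ih, pvMkItems]
    congr 1

theorem pvBridgeB2 (ks : List Int) :
    ∀ l : List (Int × List Int),
      ks.foldl
        (fun l key =>
          if pvIsFutile key then pvDInsert l key []
          else pvDInsert l key ((pvDGetD l key []).filter (fun n => !pvIsFutile n)))
        l
      = (ks.foldl
          (fun d key =>
            if pvIsFutile key then d.insert key ([] : List Int)
            else d.insert key ((d.getD key []).filter (fun n => !pvIsFutile n)))
          (PySem.Dict.mk l)).items := by
  induction ks with
  | nil => intro l; rfl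
  | cons k t ih =>
    intro l
    simp only [List.foldl_cons]
    by_cases h : pvIsFutile k
    · rw [if_pos h, if_pos h, ih]
      congr 1
    · rw [if_neg h, if_neg h, ih]
      congr 1

theorem pvFlatList {α : Type} (g : α → Int → α) (l : α) :
    pvF.foldl g l
      = (PySem.List.pyRange 1 61).foldl
          (fun l col =>
            (PySem.List.pyRange (PySem.List.pyGetD pvStartingRows col 0) 41).foldl
              (fun l row => g l ((row - 1) * 60 + col)) l)
          l := by
  rw [pvF, List.foldl_flatMap]
  simp only [List.foldl_map]

theorem pvA_eq (a : List (Int × List Int)) :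
    nodeCleaner a = pvF.foldl pvListPhase a := by
  rw [nodeCleaner.eq_def, pvFlatList]
  rfl

theorem pvB_eq (a : List (Int × List Int)) :
    nodeCleaner_alt a =
      (let d1 := pvF.foldl (fun l f => pvDSetdefault l f []) a
       (pvDKeys d1).foldl
         (fun l key =>
           if pvIsFutile key then pvDInsert l key []
           else pvDInsert l key ((pvDGetD l key []).filter (fun n => !pvIsFutile n)))
         d1) := by
  rw [nodeCleaner_alt.eq_def, pvFlatList (fun l f => pvDSetdefault l f [])]

theorem pvPass1_items (a : List (Int × List Int)) :
    pvF.foldl (fun l f => pvDSetdefault l f []) a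
      = a ++ (pvNewKeys pvF (pvDKeys a)).map (fun k => (k, ([] : List Int))) := by
  rw [pvBridgeSD, pvSDfold]
  rfl

theorem pvPass1_keys (a : List (Int × List Int)) :
    pvDKeys (pvF.foldl (fun l f => pvDSetdefault l f []) a)
      = pvDKeys a ++ pvNewKeys pvF (pvDKeys a) := by
  rw [pvPass1_items, pvDKeys, PySem.Dict.keys]
  show (a ++ (pvNewKeys pvF (pvDKeys a)).map fun k => (k, ([] : List Int))).map (fun x => x.1)
      = pvDKeys a ++ pvNewKeys pvF (pvDKeys a)
  rw [List.map_append, List.map_map]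
  congr 1
  have e : List.map ((fun (x : Int × List Int) => x.1) ∘ fun k => (k, ([] : List Int)))
      (pvNewKeys pvF (pvDKeys a)) = List.map id (pvNewKeys pvF (pvDKeys a)) := rfl
  rw [e, List.map_id]

theorem pvFinal (a : List (Int × List Int)) (hPre : (a.map Prod.fst).Nodup) :
    nodeCleaner a = nodeCleaner_alt a := by
  have hnd0 : (PySem.Dict.mk a).keys.Nodup := hPre
  rw [pvA_eq, pvBridgeA, pvAfold pvF _ hnd0, pvB_eq]
  show _ = (pvDKeys (pvF.foldl (fun l f => pvDSetdefault l f []) a)).foldl _ _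
  have hnd1 : (PySem.Dict.mk (pvF.foldl (fun l f => pvDSetdefault l f []) a)).keys.Nodup := by
    show (pvDKeys (pvF.foldl (fun l f => pvDSetdefault l f []) a)).Nodup
    rw [pvPass1_keys]
    have hs := pvNewKeys_spec pvF (pvDKeys a)
    exact List.Nodup.append hnd0 hs.2 (fun x hx1 hx2 => hs.1 x hx2 hx1)
  rw [pvBridgeB2, show pvDKeys (pvF.foldl (fun l f => pvDSetdefault l f []) a)
        = (PySem.Dict.mk (pvF.foldl (fun l f => pvDSetdefault l f []) a)).keys from rfl,
    pvBpass2 _ hnd1, pvPass1_items]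
  show _ = ((a ++ (pvNewKeys pvF (pvDKeys a)).map fun k => (k, ([] : List Int))).map _)
  rw [List.map_append, List.map_map]
  congr 1
  · apply List.map_congr_left
    intro kv _
    by_cases hf : pvIsFutile kv.1
    · have hin : kv.1 ∈ pvF := (pvMemF kv.1).mpr hf
      simp [hf, hin]
    · have hnot : kv.1 ∉ pvF := fun h => hf ((pvMemF kv.1).mp h)
      simp only [hf, if_neg hnot, Bool.false_eq_true, if_false]
      refine congrArg (fun z => (kv.1, z)) ?_
      apply List.filter_congr
      intro x _
      by_cases hx : pvIsFutile x
      · have : x ∈ pvF := (pvMemF x).mpr hx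
        simp [hx, this]
      · have : x ∉ pvF := fun h => hx ((pvMemF x).mp h)
        simp [hx, this]
  · apply List.map_congr_left
    intro k _
    simp

-- ===== VERDICT (by name: the statement is the Claim_ definition above) =====
theorem nodeCleaner_spec : Claim_equal_nodeCleaner := by
  intro adjList _hDom hPre
  unfold Spec_nodeCleaner
  exact (pvFinal adjList hPre).symm ▸ rfl
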